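-- pv_equiv track=rewrite | github.com/Technologicat/unpythonic | unpythonic/it.py | butlastn
-- ===== SOURCE A (Python) =====
-- from collections import deque
--
-- def butlastn(n, iterable):
--     """Yield all items from iterable, except the last n (if iterable is finite).
--
--     Return a generator.
--
--     Uses intermediate storage - do not use the original iterator after calling
--     ``butlastn``.
--     """
--     it = iter(iterable)
--     q = deque()
--     for _ in range(n + 1):
--         try:
--             q.append(next(it))
--         except StopIteration:
--             return
--     while True:
--         yield q.popleft()
--         try:
--             q.append(next(it))
--         except StopIteration:
--             return
-- ===== SOURCE B (Python) =====
-- def butlastn(n, iterable):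
--     """Yield all items from iterable, except the last n (if iterable is finite)."""
--     items = list(iterable)
--     stop = len(items) - n
--     if stop > 0:
--         yield from items[:stop]
-- ===== Notes on version B (the rewrite author's own statement) =====
-- stated objective: simpler
-- what changed: Replaces the streaming read-one/yield-one sliding deque with a collect-everything-then-emit-prefix decomposition: materialize the iterable, then yield items[:len-n] when positive.
-- crash fix: For negative n A raises IndexError (popleft from an empty deque) on the first next(); B returns the whole list, the natural reading of 'drop the last n' for n <= 0. — e.g. on butlastn(-1, [1, 2, 3]): A raises IndexError, B returns [1, 2, 3]
import Mathlib
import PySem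

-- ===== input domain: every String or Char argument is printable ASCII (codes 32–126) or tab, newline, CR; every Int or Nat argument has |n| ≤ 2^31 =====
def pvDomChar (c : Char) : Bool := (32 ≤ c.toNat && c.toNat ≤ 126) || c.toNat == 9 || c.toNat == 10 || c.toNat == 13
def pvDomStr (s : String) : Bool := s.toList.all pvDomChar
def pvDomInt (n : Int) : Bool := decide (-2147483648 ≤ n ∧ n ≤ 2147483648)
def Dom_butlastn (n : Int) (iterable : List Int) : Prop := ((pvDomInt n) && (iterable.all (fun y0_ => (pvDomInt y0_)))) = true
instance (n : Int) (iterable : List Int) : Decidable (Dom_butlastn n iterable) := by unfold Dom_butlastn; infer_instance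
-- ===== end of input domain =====

-- B collects the whole iterable and emits the prefix items[:len-n] instead of A's
-- streaming deque; equivalence is about the returned sequence of yielded items.

-- ===== PORT A =====
-- `for _ in range(n+1): q.append(next(it))`; none = StopIteration hit (generator returns)
def butlastnFill : Nat → List Int → List Int → Option (List Int × List Int)
  | 0, it, q => some (q, it)
  | _+1, [], _ => none
  | k+1, x :: it, q => butlastnFill k it (q ++ [x])

-- `while True: yield q.popleft(); q.append(next(it))`; the `[], _` case is the
-- empty-deque popleft, an IndexError in Python (excluded by Pre_butlastn)
def butlastnLoop : List Int → List Int → List Int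
  | [], _ => []
  | x :: _, [] => [x]
  | x :: qs, y :: it => x :: butlastnLoop (qs ++ [y]) it

def butlastn (n : Int) (iterable : List Int) : List Int :=
  match butlastnFill (n + 1).toNat iterable [] with
  | none => []
  | some (q, it) => butlastnLoop q it

-- ===== PORT B =====
def butlastn_alt (n : Int) (iterable : List Int) : List Int :=
  let stop : Int := iterable.length - n
  if 0 < stop then iterable.take stop.toNat else []

-- ===== PRECONDITION & SPEC =====
-- For n < 0 the Python A always raises IndexError (popleft from the empty deque).
def Pre_butlastn (n : Int) (iterable : List Int) : Prop := 0 ≤ n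
instance (n : Int) (iterable : List Int) : Decidable (Pre_butlastn n iterable) := by unfold Pre_butlastn; infer_instance
def pvWitness_butlastn : Int × List Int := (2, [1, 2, 3, 4])

-- For negative n A raises IndexError on the first next(); B returns the whole list,
-- the natural reading of "drop the last n" for n ≤ 0.
def Raises_butlastn (n : Int) (iterable : List Int) : Prop := n < 0
instance (n : Int) (iterable : List Int) : Decidable (Raises_butlastn n iterable) := by unfold Raises_butlastn; infer_instance
def pvRaiseWitness_butlastn : Int × List Int := (-1, [1, 2, 3])
def pvRaiseWitnessOut_butlastn : List Int := [1, 2, 3]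

def Spec_butlastn (n : Int) (iterable : List Int) (out : List Int) : Prop := out = butlastn_alt n iterable
instance (n : Int) (iterable : List Int) (out : List Int) : Decidable (Spec_butlastn n iterable out) := by unfold Spec_butlastn; infer_instance

-- ===== CLAIM (what is proved, stated in full; the proofs are below) =====
def Claim_equal_butlastn : Prop := ∀ (n : Int) (iterable : List Int), Dom_butlastn n iterable → Pre_butlastn n iterable → Spec_butlastn n iterable (butlastn n iterable)
def Claim_raises_butlastn : Prop := (∀ (n : Int) (iterable : List Int), Dom_butlastn n iterable → Raises_butlastn n iterable → ¬ Pre_butlastn n iterable) ∧ (Dom_butlastn (pvRaiseWitness_butlastn.1) (pvRaiseWitness_butlastn.2) ∧ Raises_butlastn (pvRaiseWitness_butlastn.1) (pvRaiseWitness_butlastn.2) ∧ butlastn_alt (pvRaiseWitness_butlastn.1) (pvRaiseWitness_butlastn.2) = pvRaiseWitnessOut_butlastn)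

-- ===== LEMMAS AND PROOFS =====
theorem fill_eq : ∀ (k : Nat) (it q : List Int),
    butlastnFill k it q =
      if it.length < k then none else some (q ++ it.take k, it.drop k) := by
  intro k
  induction k with
  | zero => intro it q; simp [butlastnFill]
  | succ k ih =>
    intro it q
    cases it with
    | nil => simp [butlastnFill]
    | cons x it =>
      simp [butlastnFill, ih, List.append_assoc]

theorem loop_eq : ∀ (it q : List Int), q ≠ [] →
    butlastnLoop q it = (q ++ it).take (it.length + 1) := by
  intro it
  induction it with
  | nil =>
    intro q hq
    cases q with
    | nil => exact absurd rfl hq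
    | cons x qs => simp [butlastnLoop]
  | cons y it ih =>
    intro q hq
    cases q with
    | nil => exact absurd rfl hq
    | cons x qs =>
      have h := ih (qs ++ [y]) (by simp)
      simp [butlastnLoop, h, List.append_assoc]

theorem butlastn_spec : Claim_equal_butlastn := by
  intro n iterable _ hpre
  replace hpre : 0 ≤ n := hpre
  unfold Spec_butlastn butlastn butlastn_alt
  rw [fill_eq]
  by_cases h : iterable.length < (n + 1).toNat
  · simp only [if_pos h]
    have hstop : ¬ (0 : Int) < iterable.length - n := by omega
    rw [if_neg hstop]
  · simp only [if_neg h]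
    rw [loop_eq]
    · simp only [List.nil_append]
      rw [List.take_append_drop]
      have hstop : (0 : Int) < iterable.length - n := by omega
      rw [if_pos hstop]
      have hlen : (iterable.drop (n + 1).toNat).length = iterable.length - (n + 1).toNat := by
        simp
      rw [hlen]
      have : iterable.length - (n + 1).toNat + 1 = ((iterable.length : Int) - n).toNat := by
        omega
      rw [this]
    · apply List.ne_nil_of_length_pos
      simp only [List.nil_append, List.length_take]
      omega

@[simp] theorem butlastn_raises : Claim_raises_butlastn := by
  unfold Claim_raises_butlastn
  constructor
  · intro n iterable _ hr hp
    exact absurd hp (by unfold Pre_butlastn Raises_butlastn at *; omega)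
  · exact ⟨by decide, by decide, by decide⟩
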